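-- pv_equiv track=rewrite | github.com/StanislavRND/ProjectManacova | PZ_6/PZ_6_1.py | increase_number
-- ===== SOURCE A (Python) =====
-- def increase_number(lst):
--     first_num = None
--     for i in range(len(lst)):
--         if lst[i] % 2 == 0:
--             if first_num is None:
--                 first_num = lst[i]
--             lst[i] += first_num
--     return lst
-- ===== SOURCE B (Python) =====
-- def increase_number(lst):
--     first_num = next((x for x in lst if x % 2 == 0), None)
--     if first_num is None:
--         return lst
--     for i, x in enumerate(lst):
--         if x % 2 == 0:
--             lst[i] = x + first_num
--     return lst
-- ===== Notes on version B (the rewrite author's own statement) =====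
-- stated objective: simpler
-- what changed: Replaces A's single interleaved pass carrying an Optional accumulator with a find-then-apply decomposition: one pass finds the first even value, a second pass adds it to every even element (same in-place mutation of lst).
import Mathlib
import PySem

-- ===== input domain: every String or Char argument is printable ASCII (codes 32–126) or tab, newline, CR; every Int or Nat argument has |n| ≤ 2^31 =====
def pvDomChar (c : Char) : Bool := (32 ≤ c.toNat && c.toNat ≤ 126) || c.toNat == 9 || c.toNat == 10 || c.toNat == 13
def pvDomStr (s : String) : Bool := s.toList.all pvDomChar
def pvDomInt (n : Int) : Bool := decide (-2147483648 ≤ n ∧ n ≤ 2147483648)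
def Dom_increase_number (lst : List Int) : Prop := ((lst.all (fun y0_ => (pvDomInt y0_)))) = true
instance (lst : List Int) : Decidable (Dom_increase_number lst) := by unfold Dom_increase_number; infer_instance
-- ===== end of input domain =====

-- ===== PORT A =====
-- Header: B replaces A's single interleaved pass (Option accumulator) with a
-- find-first-even-then-apply two-pass decomposition; return values proved equal
-- (both Pythons mutate lst in place; the claim is about the returned list's value).
def isEvenB (x : Int) : Bool := PySem.Int.mod x 2 == 0

-- A: one pass, carrying first_num : Option Int (A's loop state), exactly A's branch order.
def increaseGoA (first_num : Option Int) (lst : List Int) : List Int :=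
  match lst with
  | [] => []
  | x :: xs =>
    if isEvenB x then
      match first_num with
      | none => (x + x) :: increaseGoA (some x) xs
      | some f => (x + f) :: increaseGoA (some f) xs
    else
      x :: increaseGoA first_num xs

def increase_number (lst : List Int) : List Int := increaseGoA none lst

-- ===== PORT B =====
-- B: find the first even value, then add it to every even element.
def increase_number_alt (lst : List Int) : List Int :=
  match lst.find? (fun x => isEvenB x) with
  | none => lst
  | some f => lst.map (fun x => if isEvenB x then x + f else x)

-- ===== PRECONDITION & SPEC =====
def Spec_increase_number (lst : List Int) (out : List Int) : Prop := out = increase_number_alt lst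
instance (lst : List Int) (out : List Int) : Decidable (Spec_increase_number lst out) := by unfold Spec_increase_number; infer_instance

-- ===== CLAIM (what is proved, stated in full; the proofs are below) =====
def Claim_equal_increase_number : Prop := ∀ (lst : List Int), Dom_increase_number lst → Spec_increase_number lst (increase_number lst)

-- ===== LEMMAS AND PROOFS =====
theorem increaseGoA_some (f : Int) (xs : List Int) :
    increaseGoA (some f) xs = xs.map (fun x => if isEvenB x then x + f else x) := by
  induction xs with
  | nil => rfl
  | cons x xs ih =>
    simp only [increaseGoA, List.map, ih]
    cases h : isEvenB x <;> simp

-- ===== VERDICT (by name: the statement is the Claim_ definition above) =====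
theorem increase_number_spec : Claim_equal_increase_number := by
  intro lst hdom
  unfold Spec_increase_number increase_number increase_number_alt
  induction lst with
  | nil => rfl
  | cons x xs ih =>
    have hdx : Dom_increase_number xs := by
      simp only [Dom_increase_number, List.all_cons, Bool.and_eq_true] at hdom
      exact hdom.2
    cases h : isEvenB x with
    | true =>
      simp [increaseGoA, h, increaseGoA_some]
    | false =>
      have hfind : List.find? (fun x => isEvenB x) (x :: xs)
          = List.find? (fun x => isEvenB x) xs := by
        simp [h]
      simp only [increaseGoA, h, Bool.false_eq_true, if_neg, not_false_iff, hfind]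
      rw [ih hdx]
      cases hf : xs.find? (fun x => isEvenB x) <;> simp [h]
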